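-- pv_equiv track=rewrite | github.com/RNSsanjay/Agentic-AI-Hackathon | backend/utils/rag_system.py | _determine_domain_from_title
-- ===== SOURCE A (Python) =====
-- def _determine_domain_from_title(title, query=None):
--     """Determine domain from job title with query context"""
--     title_lower = title.lower()
--     query_lower = query.lower() if query else ""
--
--     # Use query context for better domain detection
--     if query:
--         if "data science" in query_lower or "data" in query_lower:
--             if any(word in title_lower for word in ['data', 'analytics', 'scientist', 'analyst']):
--                 return "Data Science"
--         elif "software" in query_lower or "engineer" in query_lower:
--             if any(word in title_lower for word in ['software', 'engineer', 'developer', 'programming']):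
--                 return "Software Engineering"
--         elif "web" in query_lower:
--             return "Web Development"
--         elif "machine learning" in query_lower or "ml" in query_lower:
--             return "Machine Learning"
--         elif "product" in query_lower:
--             return "Product Management"
--         elif "design" in query_lower or "ux" in query_lower:
--             return "UI/UX Design"
--
--     # Fallback to title-based detection
--     if any(word in title_lower for word in ['software', 'engineer', 'developer', 'programming', 'backend', 'frontend', 'full-stack']):
--         return "Software Engineering"
--     elif any(word in title_lower for word in ['data', 'analytics', 'scientist', 'analyst']):
--         return "Data Science"
--     elif any(word in title_lower for word in ['web', 'frontend', 'react', 'angular', 'vue']):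
--         return "Web Development"
--     elif any(word in title_lower for word in ['mobile', 'ios', 'android', 'react native', 'flutter']):
--         return "Mobile Development"
--     elif any(word in title_lower for word in ['devops', 'infrastructure', 'cloud', 'aws', 'azure']):
--         return "DevOps"
--     elif any(word in title_lower for word in ['design', 'ui', 'ux', 'user experience', 'designer']):
--         return "UI/UX Design"
--     elif any(word in title_lower for word in ['machine learning', 'ai', 'artificial intelligence', 'ml']):
--         return "Machine Learning"
--     elif any(word in title_lower for word in ['product', 'management', 'pm', 'manager']):
--         return "Product Management"
--     else:
--         return "Software Engineering"  # Default
-- ===== SOURCE B (Python) =====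
-- _QUERY_RULES = [
--     (["data science", "data"], (["data", "analytics", "scientist", "analyst"], "Data Science")),
--     (["software", "engineer"], (["software", "engineer", "developer", "programming"], "Software Engineering")),
--     (["web"], (None, "Web Development")),
--     (["machine learning", "ml"], (None, "Machine Learning")),
--     (["product"], (None, "Product Management")),
--     (["design", "ux"], (None, "UI/UX Design")),
-- ]
--
-- _TITLE_RULES = [
--     (["software", "engineer", "developer", "programming", "backend", "frontend", "full-stack"], "Software Engineering"),
--     (["data", "analytics", "scientist", "analyst"], "Data Science"),
--     (["web", "frontend", "react", "angular", "vue"], "Web Development"),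
--     (["mobile", "ios", "android", "react native", "flutter"], "Mobile Development"),
--     (["devops", "infrastructure", "cloud", "aws", "azure"], "DevOps"),
--     (["design", "ui", "ux", "user experience", "designer"], "UI/UX Design"),
--     (["machine learning", "ai", "artificial intelligence", "ml"], "Machine Learning"),
--     (["product", "management", "pm", "manager"], "Product Management"),
-- ]
--
-- # flattened keyword-level indexes: one (keyword, priority, payload) entry per keyword
-- _QUERY_INDEX = [(w, p, v) for p, (ws, v) in enumerate(_QUERY_RULES) for w in ws]
-- _TITLE_INDEX = [(w, p, v) for p, (ws, v) in enumerate(_TITLE_RULES) for w in ws]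
--
--
-- def _best(index, text):
--     """Argmin-by-priority scan over the flattened keyword index."""
--     best = None
--     for w, p, v in index:
--         if w in text and (best is None or p < best[0]):
--             best = (p, v)
--     return best
--
--
-- def _determine_domain_from_title(title, query=None):
--     """Determine domain via flattened keyword->(priority, payload) indexes and an argmin scan."""
--     title_lower = title.lower()
--     if query:
--         hit = _best(_QUERY_INDEX, query.lower())
--         if hit is not None:
--             title_words, domain = hit[1]
--             if title_words is None or any(w in title_lower for w in title_words):
--                 return domain
--     hit = _best(_TITLE_INDEX, title_lower)
--     return hit[1] if hit is not None else "Software Engineering"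
-- ===== Notes on version B (the rewrite author's own statement) =====
-- stated objective: alternative
-- what changed: Replaced the if/elif keyword ladders by flattened keyword->(priority,payload) indexes scanned once with an argmin-by-priority accumulator: the matching keyword of minimal priority decides the domain, instead of group-by-group short-circuit branching.
import Mathlib
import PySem

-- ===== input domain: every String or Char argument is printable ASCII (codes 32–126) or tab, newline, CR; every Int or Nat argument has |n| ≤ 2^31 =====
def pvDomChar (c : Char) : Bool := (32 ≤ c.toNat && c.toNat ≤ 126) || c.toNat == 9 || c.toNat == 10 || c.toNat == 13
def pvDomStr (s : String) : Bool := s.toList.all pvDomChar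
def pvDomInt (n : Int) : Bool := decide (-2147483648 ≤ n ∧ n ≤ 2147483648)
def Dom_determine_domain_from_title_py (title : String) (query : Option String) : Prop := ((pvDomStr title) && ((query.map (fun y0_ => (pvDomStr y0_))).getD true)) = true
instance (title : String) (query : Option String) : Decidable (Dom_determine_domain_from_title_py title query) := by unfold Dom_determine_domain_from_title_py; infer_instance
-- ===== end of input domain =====

-- B flattens the rules into keyword->(priority, payload) indexes and picks the matching keyword of minimal priority (argmin scan), instead of A's if/elif ladders.

-- ===== PORT A =====
-- literal transliteration of A's if/elif ladders
def determine_domain_from_title_py (title : String) (query : Option String) : String :=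
  let title_lower := PySem.Str.lower title
  let qTruthy : Bool := match query with | some s => decide (s ≠ "") | none => false
  let query_lower := if qTruthy then PySem.Str.lower (query.getD "") else ""
  let fallback :=
    if ["software", "engineer", "developer", "programming", "backend", "frontend", "full-stack"].any (fun w => PySem.Str.isIn w title_lower) then "Software Engineering"
    else if ["data", "analytics", "scientist", "analyst"].any (fun w => PySem.Str.isIn w title_lower) then "Data Science"
    else if ["web", "frontend", "react", "angular", "vue"].any (fun w => PySem.Str.isIn w title_lower) then "Web Development"
    else if ["mobile", "ios", "android", "react native", "flutter"].any (fun w => PySem.Str.isIn w title_lower) then "Mobile Development"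
    else if ["devops", "infrastructure", "cloud", "aws", "azure"].any (fun w => PySem.Str.isIn w title_lower) then "DevOps"
    else if ["design", "ui", "ux", "user experience", "designer"].any (fun w => PySem.Str.isIn w title_lower) then "UI/UX Design"
    else if ["machine learning", "ai", "artificial intelligence", "ml"].any (fun w => PySem.Str.isIn w title_lower) then "Machine Learning"
    else if ["product", "management", "pm", "manager"].any (fun w => PySem.Str.isIn w title_lower) then "Product Management"
    else "Software Engineering"
  if qTruthy then
    if PySem.Str.isIn "data science" query_lower || PySem.Str.isIn "data" query_lower then
      if ["data", "analytics", "scientist", "analyst"].any (fun w => PySem.Str.isIn w title_lower) then "Data Science" else fallback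
    else if PySem.Str.isIn "software" query_lower || PySem.Str.isIn "engineer" query_lower then
      if ["software", "engineer", "developer", "programming"].any (fun w => PySem.Str.isIn w title_lower) then "Software Engineering" else fallback
    else if PySem.Str.isIn "web" query_lower then "Web Development"
    else if PySem.Str.isIn "machine learning" query_lower || PySem.Str.isIn "ml" query_lower then "Machine Learning"
    else if PySem.Str.isIn "product" query_lower then "Product Management"
    else if PySem.Str.isIn "design" query_lower || PySem.Str.isIn "ux" query_lower then "UI/UX Design"
    else fallback
  else fallback

-- ===== PORT B =====
def pvQueryRules : List (List String × Option (List String) × String) :=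
  [ (["data science", "data"], some ["data", "analytics", "scientist", "analyst"], "Data Science"),
    (["software", "engineer"], some ["software", "engineer", "developer", "programming"], "Software Engineering"),
    (["web"], none, "Web Development"),
    (["machine learning", "ml"], none, "Machine Learning"),
    (["product"], none, "Product Management"),
    (["design", "ux"], none, "UI/UX Design") ]

def pvTitleRules : List (List String × String) :=
  [ (["software", "engineer", "developer", "programming", "backend", "frontend", "full-stack"], "Software Engineering"),
    (["data", "analytics", "scientist", "analyst"], "Data Science"),
    (["web", "frontend", "react", "angular", "vue"], "Web Development"),
    (["mobile", "ios", "android", "react native", "flutter"], "Mobile Development"),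
    (["devops", "infrastructure", "cloud", "aws", "azure"], "DevOps"),
    (["design", "ui", "ux", "user experience", "designer"], "UI/UX Design"),
    (["machine learning", "ai", "artificial intelligence", "ml"], "Machine Learning"),
    (["product", "management", "pm", "manager"], "Product Management") ]

-- Python's module-level flattening comprehension (enumerate + nested for)
def pvFlattenFrom {α : Type} (k : Int) (groups : List (List String × α)) : List (String × Int × α) :=
  match groups with
  | [] => []
  | g :: rest => g.1.map (fun w => (w, k, g.2)) ++ pvFlattenFrom (k + 1) rest

def pvQueryIndex : List (String × Int × Option (List String) × String) := pvFlattenFrom 0 pvQueryRules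
def pvTitleIndex : List (String × Int × String) := pvFlattenFrom 0 pvTitleRules

-- "best is None or p < best[0]"
def pvBetter {α : Type} (p : Int) (best : Option (Int × α)) : Bool :=
  match best with
  | none => true
  | some b => decide (p < b.1)

-- the loop body of B's _best
def pvBestStep {α : Type} (text : String) (best : Option (Int × α)) (e : String × Int × α) : Option (Int × α) :=
  if PySem.Str.isIn e.1 text && pvBetter e.2.1 best then some e.2 else best

-- B's _best: argmin-by-priority scan over the flattened index
def pvBest {α : Type} (index : List (String × Int × α)) (text : String) : Option (Int × α) :=
  index.foldl (pvBestStep text) none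

def determine_domain_from_title_py_alt (title : String) (query : Option String) : String :=
  let title_lower := PySem.Str.lower title
  let fallback : String :=
    match pvBest pvTitleIndex title_lower with
    | some h => h.2
    | none => "Software Engineering"
  match query with
  | some q =>
    if q ≠ "" then
      match pvBest pvQueryIndex (PySem.Str.lower q) with
      | some h =>
        match h.2.1 with
        | none => h.2.2
        | some ws => if ws.any (fun w => PySem.Str.isIn w title_lower) then h.2.2 else fallback
      | none => fallback
    else fallback
  | none => fallback

-- ===== PRECONDITION & SPEC =====
def Spec_determine_domain_from_title_py (title : String) (query : Option String) (out : String) : Prop := out = determine_domain_from_title_py_alt title query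
instance (title : String) (query : Option String) (out : String) : Decidable (Spec_determine_domain_from_title_py title query out) := by unfold Spec_determine_domain_from_title_py; infer_instance

-- ===== CLAIM (what is proved, stated in full; the proofs are below) =====
def Claim_equal_determine_domain_from_title_py : Prop := ∀ (title : String) (query : Option String), Dom_determine_domain_from_title_py title query → Spec_determine_domain_from_title_py title query (determine_domain_from_title_py title query)

-- ===== LEMMAS AND PROOFS =====

-- first group whose keyword list has a match (proof-side characterisation of B's argmin)
def pvFirst {α : Type} (groups : List (List String × α)) (t : String) : Option α :=
  match groups with
  | [] => none
  | g :: rest => if g.1.any (fun w => PySem.Str.isIn w t) then some g.2 else pvFirst rest t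

-- every entry of pvFlattenFrom k has priority ≥ k
theorem pvFlattenFrom_prio_ge {α : Type} (k : Int) (groups : List (List String × α)) :
    ∀ e ∈ pvFlattenFrom k groups, k ≤ e.2.1 := by
  induction groups generalizing k with
  | nil => intro e he; simp [pvFlattenFrom] at he
  | cons g rest ih =>
    intro e he
    simp only [pvFlattenFrom, List.mem_append, List.mem_map] at he
    rcases he with ⟨w, _, rfl⟩ | h
    · exact le_refl k
    · have := ih (k + 1) e h; omega

-- once best holds a priority that is a lower bound for the rest, it never changes
theorem pvBest_frozen {α : Type} (t : String) (b : Int × α) (index : List (String × Int × α))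
    (h : ∀ e ∈ index, b.1 ≤ e.2.1) :
    index.foldl (pvBestStep t) (some b) = some b := by
  induction index with
  | nil => rfl
  | cons e rest ih =>
    have hb : b.1 ≤ e.2.1 := h e (List.mem_cons_self)
    have hd : decide (e.2.1 < b.1) = false := by simp; omega
    have step : pvBestStep t (some b) e = some b := by
      simp only [pvBestStep, pvBetter, hd, Bool.and_false]
      simp
    rw [List.foldl_cons, step]
    exact ih (fun e he => h e (List.mem_cons_of_mem _ he))

-- a group none of whose keywords match contributes nothing
theorem pvBest_group_none {α : Type} (t : String) (k : Int) (v : α) (ws : List String)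
    (h : ws.any (fun w => PySem.Str.isIn w t) = false) :
    (ws.map (fun w => (w, k, v))).foldl (pvBestStep t) none = none := by
  induction ws with
  | nil => rfl
  | cons w rest ih =>
    simp only [List.any_cons, Bool.or_eq_false_iff] at h
    have step : pvBestStep t none (w, k, v) = none := by
      show (if PySem.Str.isIn w t && pvBetter k none then some (k, v) else none) = none
      rw [h.1]; rfl
    rw [List.map_cons, List.foldl_cons, step]
    exact ih h.2

-- a group with a matching keyword makes best = (k, v) for good
theorem pvBest_group_hit {α : Type} (t : String) (k : Int) (v : α) (ws : List String)
    (h : ws.any (fun w => PySem.Str.isIn w t) = true) :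
    (ws.map (fun w => (w, k, v))).foldl (pvBestStep t) none = some (k, v) := by
  induction ws with
  | nil => simp at h
  | cons w rest ih =>
    rw [List.map_cons, List.foldl_cons]
    by_cases hw : PySem.Str.isIn w t = true
    · have step : pvBestStep t none (w, k, v) = some (k, v) := by
        show (if PySem.Str.isIn w t && pvBetter k none then some (k, v) else none) = some (k, v)
        rw [hw]; rfl
      rw [step]
      exact pvBest_frozen t (k, v) _ (by
        intro e he; rcases List.mem_map.mp he with ⟨w', _, rfl⟩; exact le_refl k)
    · have hw' : PySem.Str.isIn w t = false := by
        cases hwe : PySem.Str.isIn w t; rfl; exact absurd hwe hw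
      have step : pvBestStep t none (w, k, v) = none := by
        show (if PySem.Str.isIn w t && pvBetter k none then some (k, v) else none) = none
        rw [hw']; rfl
      rw [step]
      simp only [List.any_cons, hw', Bool.false_or] at h
      exact ih h

-- main characterisation: the argmin scan over the flattened index picks the FIRST matching group
theorem pvBest_eq_first {α : Type} (t : String) (k : Int) (groups : List (List String × α)) :
    ((pvFlattenFrom k groups).foldl (pvBestStep t) none).map Prod.snd = pvFirst groups t := by
  induction groups generalizing k with
  | nil => rfl
  | cons g rest ih =>
    rw [pvFlattenFrom, List.foldl_append]
    by_cases hm : g.1.any (fun w => PySem.Str.isIn w t) = true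
    · rw [pvBest_group_hit t k g.2 g.1 hm,
        pvBest_frozen t (k, g.2) _ (by
          intro e he; have := pvFlattenFrom_prio_ge (k + 1) rest e he
          simp only at this ⊢; omega),
        pvFirst, if_pos hm]
      rfl
    · rw [pvBest_group_none t k g.2 g.1 (by simpa using hm), pvFirst, if_neg hm]
      exact ih (k + 1)

-- B's fallback expression equals A's fallback ladder
theorem pv_fb (t : String) :
    (match pvBest pvTitleIndex t with
      | some h => h.2
      | none => "Software Engineering") =
    (if ["software", "engineer", "developer", "programming", "backend", "frontend", "full-stack"].any (fun w => PySem.Str.isIn w t) then "Software Engineering"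
     else if ["data", "analytics", "scientist", "analyst"].any (fun w => PySem.Str.isIn w t) then "Data Science"
     else if ["web", "frontend", "react", "angular", "vue"].any (fun w => PySem.Str.isIn w t) then "Web Development"
     else if ["mobile", "ios", "android", "react native", "flutter"].any (fun w => PySem.Str.isIn w t) then "Mobile Development"
     else if ["devops", "infrastructure", "cloud", "aws", "azure"].any (fun w => PySem.Str.isIn w t) then "DevOps"
     else if ["design", "ui", "ux", "user experience", "designer"].any (fun w => PySem.Str.isIn w t) then "UI/UX Design"
     else if ["machine learning", "ai", "artificial intelligence", "ml"].any (fun w => PySem.Str.isIn w t) then "Machine Learning"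
     else if ["product", "management", "pm", "manager"].any (fun w => PySem.Str.isIn w t) then "Product Management"
     else "Software Engineering") := by
  have h : (pvBest pvTitleIndex t).map Prod.snd = pvFirst pvTitleRules t :=
    pvBest_eq_first t 0 pvTitleRules
  have h2 : (match pvBest pvTitleIndex t with
      | some hh => hh.2
      | none => "Software Engineering") =
      ((pvBest pvTitleIndex t).map Prod.snd).getD "Software Engineering" := by
    cases pvBest pvTitleIndex t <;> rfl
  rw [h2, h]
  simp only [pvFirst, pvTitleRules,
    apply_ite (fun o : Option String => o.getD "Software Engineering"),
    Option.getD_some, Option.getD_none]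

-- proof-side shape of B's handling of a query hit
def pvApplyQ (t fb : String) (o : Option (Option (List String) × String)) : String :=
  match o with
  | none => fb
  | some v =>
    match v.1 with
    | none => v.2
    | some ws => if ws.any (fun w => PySem.Str.isIn w t) then v.2 else fb

-- B's query expression equals A's query if/elif chain (fb abstracts the fallback)
theorem pv_q (q t fb : String) :
    (match pvBest pvQueryIndex q with
      | some h =>
        match h.2.1 with
        | none => h.2.2
        | some ws => if ws.any (fun w => PySem.Str.isIn w t) then h.2.2 else fb
      | none => fb) =
    (if PySem.Str.isIn "data science" q || PySem.Str.isIn "data" q then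
       if ["data", "analytics", "scientist", "analyst"].any (fun w => PySem.Str.isIn w t) then "Data Science" else fb
     else if PySem.Str.isIn "software" q || PySem.Str.isIn "engineer" q then
       if ["software", "engineer", "developer", "programming"].any (fun w => PySem.Str.isIn w t) then "Software Engineering" else fb
     else if PySem.Str.isIn "web" q then "Web Development"
     else if PySem.Str.isIn "machine learning" q || PySem.Str.isIn "ml" q then "Machine Learning"
     else if PySem.Str.isIn "product" q then "Product Management"
     else if PySem.Str.isIn "design" q || PySem.Str.isIn "ux" q then "UI/UX Design"
     else fb) := by
  have h : (pvBest pvQueryIndex q).map Prod.snd = pvFirst pvQueryRules q :=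
    pvBest_eq_first q 0 pvQueryRules
  have h2 : (match pvBest pvQueryIndex q with
      | some hh =>
        match hh.2.1 with
        | none => hh.2.2
        | some ws => if ws.any (fun w => PySem.Str.isIn w t) then hh.2.2 else fb
      | none => fb) = pvApplyQ t fb ((pvBest pvQueryIndex q).map Prod.snd) := by
    rcases pvBest pvQueryIndex q with _ | ⟨p, tws, d⟩
    · rfl
    · cases tws <;> rfl
  rw [h2, h]
  simp only [pvFirst, pvQueryRules, List.any_cons, List.any_nil, Bool.or_false]
  split_ifs <;> simp_all [pvApplyQ]

-- ===== VERDICT (by name: the statement is the Claim_ definition above) =====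
theorem determine_domain_from_title_py_spec : Claim_equal_determine_domain_from_title_py := by
  intro title query _
  unfold Spec_determine_domain_from_title_py determine_domain_from_title_py determine_domain_from_title_py_alt
  cases query with
  | none => exact (pv_fb (PySem.Str.lower title)).symm
  | some q =>
    by_cases hq : q = ""
    · subst hq
      exact (pv_fb (PySem.Str.lower title)).symm
    · simp only [ne_eq, hq, not_false_eq_true, decide_true, if_true, Option.getD_some]
      rw [← pv_fb (PySem.Str.lower title)]
      exact (pv_q (PySem.Str.lower q) (PySem.Str.lower title) _).symm
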